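-- pv_equiv track=rewrite | github.com/Samanek-Jan/Project | utils/cuda_kernel_validator.py | transform_template
-- ===== SOURCE A (Python) =====
-- def transform_template(token_name : str, line : str) -> str:
--     token_start_idx = line.find(token_name)
--     if token_start_idx == -1:
--         return None
--     token_end_idx = token_start_idx + len(token_name) + 1
--
--     template_param = None
--     end_tokens_set = set([",", "<"])
--     i = token_start_idx
--     while i > 0:
--         i -= 1
--         c = line[i]
--         if c in end_tokens_set:
--             template_param = line[i+1:token_end_idx]
--             break
--     if template_param is None:
--         return None
--
--     param_type = template_param.split(" ")[0].strip()
--     # substitutions are choosen ad hoc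
--     param_type_mapper = {
--         "typename" : "int",
--         "class" : "int"
--     }
--
--     return "using {} = {};".format(token_name, param_type_mapper.get(param_type, "int"))
-- ===== SOURCE B (Python) =====
-- def transform_template(token_name, line):
--     idx = line.find(token_name)
--     if idx == -1:
--         return None
--     prefix = line[:idx]
--     if "," in prefix or "<" in prefix:
--         return "using {} = int;".format(token_name)
--     return None
-- ===== Notes on version B (the rewrite author's own statement) =====
-- stated objective: simpler
-- what changed: B replaces A's backward character-by-character while loop, substring slice, split/strip and dict lookup by a single membership test for ',' or '<' in line[:idx], since A's type mapper always yields 'int'.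
import Mathlib
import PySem

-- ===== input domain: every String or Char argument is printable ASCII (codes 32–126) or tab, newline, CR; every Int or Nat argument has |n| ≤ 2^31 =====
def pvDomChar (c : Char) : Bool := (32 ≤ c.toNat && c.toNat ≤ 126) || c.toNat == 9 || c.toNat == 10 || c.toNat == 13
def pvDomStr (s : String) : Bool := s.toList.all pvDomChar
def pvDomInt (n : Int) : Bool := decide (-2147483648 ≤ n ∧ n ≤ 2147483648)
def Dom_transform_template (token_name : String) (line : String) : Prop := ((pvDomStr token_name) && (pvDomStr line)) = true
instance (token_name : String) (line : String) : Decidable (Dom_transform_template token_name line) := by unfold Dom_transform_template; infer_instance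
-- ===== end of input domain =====

-- B drops A's backward character scan, slice/split/strip and dict lookup in favour of a
-- membership test on line[:idx] (A's mapper always yields "int"); objective: simpler.

-- ===== PORT A =====
-- A's 'while i > 0: i -= 1; c = line[i]; …' loop; the Nat argument is Python's i.
-- line.getD i ' ' is line[i]: every reached index satisfies i < line.length (i < idx ≤ len(line)).
def transform_template_loop (line : List Char) (tokenEnd : Int) : Nat → Option (List Char)
  | 0 => none
  | i + 1 =>
    let c := line.getD i ' '
    if c = ',' ∨ c = '<' then some (PySem.List.slice line (some ((i : Int) + 1)) (some tokenEnd))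
    else transform_template_loop line tokenEnd i

def transform_template (token_name : String) (line : String) : Option String :=
  let token_start_idx := PySem.Str.find line token_name
  if token_start_idx = -1 then none
  else
    let token_end_idx := token_start_idx + PySem.Str.len token_name + 1
    match transform_template_loop line.toList token_end_idx token_start_idx.toNat with
    | none => none
    | some template_param =>
      -- template_param.split(" ")[0].strip(); split never returns [], so index 0 is safe (pyGetD default unreachable)
      let param_type := PySem.Chars.strip (PySem.List.pyGetD (PySem.Chars.splitOn template_param (" ".toList)) 0 [])
      let param_type_mapper : PySem.Dict (List Char) (List Char) :=
        PySem.Dict.ofList [("typename".toList, "int".toList), ("class".toList, "int".toList)]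
      some (String.ofList ("using ".toList ++ token_name.toList ++ " = ".toList ++
            PySem.Dict.getD param_type_mapper param_type ("int".toList) ++ ";".toList))

-- ===== PORT B =====
def transform_template_alt (token_name : String) (line : String) : Option String :=
  let idx := PySem.Str.find line token_name
  if idx = -1 then none
  else
    let pre := PySem.List.slice line.toList none (some idx)
    if PySem.Chars.isIn (",".toList) pre || PySem.Chars.isIn ("<".toList) pre then
      some (String.ofList ("using ".toList ++ token_name.toList ++ " = int;".toList))
    else none

-- ===== PRECONDITION & SPEC =====
def Spec_transform_template (token_name : String) (line : String) (out : Option String) : Prop := out = transform_template_alt token_name line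
instance (token_name : String) (line : String) (out : Option String) : Decidable (Spec_transform_template token_name line out) := by unfold Spec_transform_template; infer_instance

-- ===== CLAIM (what is proved, stated in full; the proofs are below) =====
def Claim_equal_transform_template : Prop := ∀ (token_name : String) (line : String), Dom_transform_template token_name line → Spec_transform_template token_name line (transform_template token_name line)

-- ===== LEMMAS AND PROOFS =====

-- A's ad-hoc mapper maps every key to "int".
theorem getD_mapper_int (pt : List Char) :
    PySem.Dict.getD (PySem.Dict.ofList [(['t','y','p','e','n','a','m','e'], ['i','n','t']), (['c','l','a','s','s'], ['i','n','t'])]) pt ['i','n','t'] = ['i','n','t'] := by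
  rw [show (PySem.Dict.ofList [(['t','y','p','e','n','a','m','e'], ['i','n','t']), (['c','l','a','s','s'], ['i','n','t'])]) = PySem.Dict.mk [(['t','y','p','e','n','a','m','e'], ['i','n','t']), (['c','l','a','s','s'], ['i','n','t'])] from rfl]
  simp only [PySem.Dict.getD, PySem.Dict.get?_mk_cons]
  split_ifs <;> rfl

-- A's backward scan succeeds exactly when line[:n] contains ',' or '<'.
theorem loop_none_iff (l : List Char) (e : Int) (n : Nat) (hn : n ≤ l.length) :
    transform_template_loop l e n = none ↔ ¬ (',' ∈ l.take n ∨ '<' ∈ l.take n) := by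
  induction n with
  | zero => simp [transform_template_loop]
  | succ i ih =>
    have hi : i < l.length := by omega
    have htake : l.take (i + 1) = l.take i ++ [l[i]] := by
      rw [List.take_add_one]; simp [List.getElem?_eq_getElem hi]
    rw [transform_template_loop, htake]
    have hgetD : l.getD i ' ' = l[i] := by
      simp [List.getD, List.getElem?_eq_getElem hi]
    rw [hgetD]
    by_cases hc : l[i] = ',' ∨ l[i] = '<'
    · simp only [if_pos hc]
      constructor
      · intro h; exact absurd h (by simp)
      · intro h
        exfalso
        rcases hc with hc | hc
        · exact h (Or.inl (by simp [hc]))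
        · exact h (Or.inr (by simp [hc]))
    · simp only [if_neg hc]
      rw [ih (by omega)]
      have hc1 : ¬(',' = l[i]) := fun e => hc (Or.inl e.symm)
      have hc2 : ¬('<' = l[i]) := fun e => hc (Or.inr e.symm)
      simp only [List.mem_append, List.mem_singleton]
      tauto

-- ===== VERDICT (by name: the statement is the Claim_ definition above) =====
theorem transform_template_spec : Claim_equal_transform_template := by
  intro token_name line _
  unfold Spec_transform_template transform_template transform_template_alt
  by_cases hf : PySem.Str.find line token_name = -1
  · simp only [PySem.Str.find_eq] at hf
    simp [hf]
  · simp only [if_neg hf]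
    have h0 : 0 ≤ PySem.Str.find line token_name := by
      have := PySem.Chars.neg_one_le_find line.toList token_name.toList
      simp only [PySem.Str.find] at *
      omega
    have hlen : PySem.Str.find line token_name ≤ line.toList.length := by
      have := PySem.Chars.find_le_length line.toList token_name.toList
      simpa [PySem.Str.find] using this
    set idx := PySem.Str.find line token_name with hidx
    have hnat : idx.toNat ≤ line.toList.length := by omega
    have hpre : PySem.List.slice line.toList none (some idx) = line.toList.take idx.toNat :=
      PySem.List.slice_to line.toList h0
    have hiff := loop_none_iff line.toList (idx + PySem.Str.len token_name + 1) idx.toNat hnat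
    have hB : (PySem.Chars.isIn (",".toList) (line.toList.take idx.toNat) ||
               PySem.Chars.isIn ("<".toList) (line.toList.take idx.toNat)) = true ↔
              (',' ∈ line.toList.take idx.toNat ∨ '<' ∈ line.toList.take idx.toNat) := by
      rw [Bool.or_eq_true, PySem.Chars.isIn_iff_infix, PySem.Chars.isIn_iff_infix]
      rw [show (",".toList) = [','] from rfl, show ("<".toList) = ['<'] from rfl]
      rw [List.singleton_infix_iff, List.singleton_infix_iff]
    rw [hpre]
    cases hloop : transform_template_loop line.toList (idx + PySem.Str.len token_name + 1) idx.toNat with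
    | none =>
      have := hiff.mp hloop
      rw [if_neg (by rw [hB]; exact this)]
    | some tp =>
      have hmem : (',' ∈ line.toList.take idx.toNat ∨ '<' ∈ line.toList.take idx.toNat) := by
        by_contra h
        have hnone := hiff.mpr h
        rw [hnone] at hloop
        simp at hloop
      rw [if_pos (hB.mpr hmem)]
      simp [getD_mapper_int]
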